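-- pv_equiv track=rewrite | github.com/thomasmichaelkane/aoc24 | lib.py | union_map
-- ===== SOURCE A (Python) =====
-- def union_map(maps):
--
--     if isinstance(maps, dict):
--         arb_map = next(iter(maps.values()))
--         w, h = len(arb_map[0]), len(arb_map)
--         union = [[1 if any([maps[k][j][i] for k in maps]) else 0 for i in range(w)] for j in range(h)]
--
--     if isinstance(maps, list):
--         arb_map = maps[0]
--         w, h = len(arb_map[0]), len(arb_map)
--         union = [[1 if any([map[j][i] for map in maps]) else 0 for i in range(w)] for j in range(h)]
--
--     return union
-- ===== SOURCE B (Python) =====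
-- def union_map(maps):
--
--     if isinstance(maps, dict):
--         arb_map = next(iter(maps.values()))
--         w, h = len(arb_map[0]), len(arb_map)
--         union = [[0] * w for _ in range(h)]
--         for k in maps:
--             m = maps[k]
--             for j in range(h):
--                 for i in range(w):
--                     if m[j][i]:
--                         union[j][i] = 1
--
--     if isinstance(maps, list):
--         arb_map = maps[0]
--         w, h = len(arb_map[0]), len(arb_map)
--         union = [[0] * w for _ in range(h)]
--         for m in maps:
--             for j in range(h):
--                 for i in range(w):
--                     if m[j][i]:
--                         union[j][i] = 1
--
--     return union
-- ===== Notes on version B (the rewrite author's own statement) =====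
-- stated objective: alternative
-- what changed: B builds a zero grid once and accumulates the union map-by-map (outer loop over maps, marking truthy cells 1), instead of A's per-cell any() scan over all maps inside a nested comprehension.
import Mathlib
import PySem

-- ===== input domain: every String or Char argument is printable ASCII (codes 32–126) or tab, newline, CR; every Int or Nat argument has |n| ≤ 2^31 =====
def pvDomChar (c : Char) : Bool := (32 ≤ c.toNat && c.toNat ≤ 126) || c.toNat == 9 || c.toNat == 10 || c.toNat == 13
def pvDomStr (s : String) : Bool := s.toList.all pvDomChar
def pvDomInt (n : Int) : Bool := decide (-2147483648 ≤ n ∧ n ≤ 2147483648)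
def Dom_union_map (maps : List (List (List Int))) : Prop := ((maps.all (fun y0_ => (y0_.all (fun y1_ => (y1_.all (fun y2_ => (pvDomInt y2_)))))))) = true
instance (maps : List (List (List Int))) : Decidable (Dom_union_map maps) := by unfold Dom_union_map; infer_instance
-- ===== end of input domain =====

-- One honest line: B accumulates the union grid map-by-map instead of A's per-cell any() scan; same cost, different decomposition.

-- ===== PORT A =====
-- A (list branch; the Lean type is a list): per-cell nested comprehension with any() over all maps.
-- Indexing uses getD; Pre_ guarantees every access is in range, so the defaults are never hit.
def union_map (maps : List (List (List Int))) : List (List Int) :=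
  let arb_map := maps.headD []
  let w := (arb_map.headD []).length
  let h := arb_map.length
  (List.range h).map (fun j =>
    (List.range w).map (fun i =>
      if maps.any (fun m => ((m.getD j []).getD i 0) ≠ 0) then 1 else 0))

-- ===== PORT B =====
-- one map folded into the accumulator grid: every truthy cell is set to 1
def unionStep (acc : List (List Int)) (m : List (List Int)) : List (List Int) :=
  acc.mapIdx (fun j row => row.mapIdx (fun i c =>
    if ((m.getD j []).getD i 0) ≠ 0 then 1 else c))

def union_map_alt (maps : List (List (List Int))) : List (List Int) :=
  let arb_map := maps.headD []
  let w := (arb_map.headD []).length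
  let h := arb_map.length
  maps.foldl unionStep (List.replicate h (List.replicate w (0 : Int)))

-- ===== PRECONDITION & SPEC =====
-- Pre_ excludes exactly the inputs where A raises: an empty list (IndexError on maps[0]),
-- an empty first map (IndexError on arb_map[0]), and maps too short/ragged for the
-- first map's dimensions (IndexError on map[j][i]).
def Pre_union_map (maps : List (List (List Int))) : Prop :=
  maps ≠ [] ∧ maps.headD [] ≠ [] ∧
  (((maps.headD []).headD []).length = 0 ∨
    ∀ m ∈ maps, (maps.headD []).length ≤ m.length ∧
      ∀ j ∈ List.range (maps.headD []).length,
        ((maps.headD []).headD []).length ≤ (m.getD j []).length)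
instance (maps : List (List (List Int))) : Decidable (Pre_union_map maps) := by
  unfold Pre_union_map; infer_instance

def pvWitness_union_map : List (List (List Int)) := [[[0, 1], [2, 0]], [[0, 0], [0, 3]]]

def Spec_union_map (maps : List (List (List Int))) (out : List (List Int)) : Prop := out = union_map_alt maps
instance (maps : List (List (List Int))) (out : List (List Int)) : Decidable (Spec_union_map maps out) := by unfold Spec_union_map; infer_instance

-- ===== CLAIM (what is proved, stated in full; the proofs are below) =====
def Claim_equal_union_map : Prop := ∀ (maps : List (List (List Int))), Dom_union_map maps → Pre_union_map maps → Spec_union_map maps (union_map maps)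

-- ===== LEMMAS AND PROOFS =====

-- unionStep preserves the grid's outer length
lemma unionStep_length (acc m : List (List Int)) :
    (unionStep acc m).length = acc.length := by
  simp [unionStep]

-- unionStep preserves each row's length
lemma unionStep_row_length (acc m : List (List Int)) (j : Nat) :
    ((unionStep acc m).getD j []).length = (acc.getD j []).length := by
  by_cases hj : j < acc.length
  · simp [unionStep, List.getD, List.getElem?_mapIdx, hj, List.getElem?_eq_getElem]
  · simp [unionStep, List.getD, List.getElem?_eq_none, hj, Nat.le_of_not_lt,
      List.getElem?_mapIdx, List.getElem?_eq_none (by simpa using Nat.le_of_not_lt hj)]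

-- cell of unionStep, for an in-range cell
lemma unionStep_cell (acc m : List (List Int)) (j i : Nat)
    (hj : j < acc.length) (hi : i < (acc.getD j []).length) :
    ((unionStep acc m).getD j []).getD i 0 =
      if ((m.getD j []).getD i 0) ≠ 0 then 1 else (acc.getD j []).getD i 0 := by
  have hj' : acc.getD j [] = acc[j] := by simp [List.getD, List.getElem?_eq_getElem hj]
  have hi' : i < acc[j].length := by rw [hj'] at hi; exact hi
  simp [unionStep, List.getD, List.getElem?_mapIdx, List.getElem?_eq_getElem hj,
    List.getElem?_eq_getElem hi', hj']

-- folding unionStep over L: a cell is 1 iff some map in L is truthy there, else the start value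
lemma foldl_unionStep_cell (L : List (List (List Int))) (acc : List (List Int)) (j i : Nat)
    (hj : j < acc.length) (hi : i < (acc.getD j []).length) :
    ((L.foldl unionStep acc).getD j []).getD i 0 =
      if L.any (fun m => ((m.getD j []).getD i 0) ≠ 0) then 1 else (acc.getD j []).getD i 0 := by
  induction L generalizing acc with
  | nil => simp
  | cons m L ih =>
    have hj2 : j < (unionStep acc m).length := by rw [unionStep_length]; exact hj
    have hi2 : i < ((unionStep acc m).getD j []).length := by rw [unionStep_row_length]; exact hi
    rw [List.foldl_cons, ih (unionStep acc m) hj2 hi2, unionStep_cell acc m j i hj hi]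
    rw [List.any_cons]
    by_cases hm : ((m.getD j []).getD i 0) ≠ 0 <;>
      cases hL : L.any (fun m => ((m.getD j []).getD i 0) ≠ 0) <;>
        simp_all

-- fold preserves the outer length
lemma foldl_unionStep_length (L : List (List (List Int))) (acc : List (List Int)) :
    (L.foldl unionStep acc).length = acc.length := by
  induction L generalizing acc with
  | nil => rfl
  | cons m L ih => rw [List.foldl_cons, ih, unionStep_length]

-- fold preserves each row length
lemma foldl_unionStep_row_length (L : List (List (List Int))) (acc : List (List Int)) (j : Nat) :
    ((L.foldl unionStep acc).getD j []).length = (acc.getD j []).length := by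
  induction L generalizing acc with
  | nil => rfl
  | cons m L ih => rw [List.foldl_cons, ih, unionStep_row_length]


-- the two decompositions compute the same grid
lemma foldl_unionStep_eq_map (L : List (List (List Int))) (h w : Nat) :
    L.foldl unionStep (List.replicate h (List.replicate w (0 : Int))) =
      (List.range h).map (fun j =>
        (List.range w).map (fun i =>
          if L.any (fun m => ((m.getD j []).getD i 0) ≠ 0) then 1 else 0)) := by
  apply List.ext_getElem
  · rw [foldl_unionStep_length]; simp
  · intro j hj1 hj2
    have hjh : j < h := by rw [foldl_unionStep_length] at hj1; simpa using hj1
    have hrowinit : (List.replicate h (List.replicate w (0 : Int))).getD j [] = List.replicate w 0 := by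
      rw [List.getD_eq_getElem _ _ (show j < (List.replicate h (List.replicate w (0 : Int))).length by simpa using hjh)]
      simp
    have hrowlen : ((L.foldl unionStep (List.replicate h (List.replicate w (0 : Int)))).getD j []).length = w := by
      rw [foldl_unionStep_row_length, hrowinit]; simp
    have hrow : (L.foldl unionStep (List.replicate h (List.replicate w (0 : Int))))[j] =
        (L.foldl unionStep (List.replicate h (List.replicate w (0 : Int)))).getD j [] :=
      (List.getD_eq_getElem _ _ hj1).symm
    rw [hrow]
    simp only [List.getElem_map, List.getElem_range]
    apply List.ext_getElem
    · rw [hrowlen]; simp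
    · intro i hi1 hi2
      have hiw : i < w := by rw [hrowlen] at hi1; exact hi1
      have hcell := foldl_unionStep_cell L (List.replicate h (List.replicate w (0 : Int))) j i
        (by simpa using hjh) (by rw [hrowinit]; simpa using hiw)
      rw [hrowinit] at hcell
      have hget : ((L.foldl unionStep (List.replicate h (List.replicate w (0 : Int)))).getD j [])[i] =
          ((L.foldl unionStep (List.replicate h (List.replicate w (0 : Int)))).getD j []).getD i 0 :=
        (List.getD_eq_getElem _ _ hi1).symm
      rw [hget, hcell]
      simp [hiw]

-- ===== VERDICT (by name: the statement is the Claim_ definition above) =====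
theorem union_map_spec : Claim_equal_union_map := by
  intro maps _ _
  unfold Spec_union_map
  simp only [union_map, union_map_alt]
  exact (foldl_unionStep_eq_map maps (maps.headD []).length ((maps.headD []).headD []).length).symm
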